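-- pv_equiv track=rewrite | github.com/lhs8701/algorithm-study | baekjoon_algorithm/Sorting/20117_호반우_상인의_이상한_품질_계산법.py | solve
-- ===== SOURCE A (Python) =====
-- def solve(arr, N):
--     arr.sort()
--     middle = N // 2 - 1 if N % 2 == 0 else (N + 1) // 2 - 1
--     sum = 0
--
--     for i in range(N - 1, middle, -1):
--         sum += arr[i] * 2
--     if N % 2 == 1:
--         sum += arr[middle]
--     return sum
-- ===== SOURCE B (Python) =====
-- def solve(arr, N):
--     vals = _n_smallest(arr, N)
--     k = N // 2
--     total = 2 * _sum_largest(vals, k)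
--     if N % 2 == 1:
--         total += _kth_largest(vals, k + 1)
--     return total
--
--
-- def _n_smallest(xs, m):
--     """The m smallest elements of xs (multiset, arbitrary order), by partitioning."""
--     out = []
--     while m > 0:
--         pivot = xs[len(xs) // 2]
--         lows = [x for x in xs if x < pivot]
--         if m <= len(lows):
--             xs = lows
--             continue
--         n_eq = xs.count(pivot)
--         if m <= len(lows) + n_eq:
--             return out + lows + [pivot] * (m - len(lows))
--         out += lows + [pivot] * n_eq
--         m -= len(lows) + n_eq
--         xs = [x for x in xs if x > pivot]
--     return out
--
--
-- def _sum_largest(xs, k):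
--     """Sum of the k largest elements of xs, by three-way quickselect partitioning."""
--     acc = 0
--     while k > 0:
--         pivot = xs[len(xs) // 2]
--         highs = [x for x in xs if x > pivot]
--         if k <= len(highs):
--             xs = highs
--             continue
--         n_eq = xs.count(pivot)
--         if k <= len(highs) + n_eq:
--             return acc + sum(highs) + (k - len(highs)) * pivot
--         acc += sum(highs) + n_eq * pivot
--         k -= len(highs) + n_eq
--         xs = [x for x in xs if x < pivot]
--     return acc
--
--
-- def _kth_largest(xs, k):
--     """The k-th largest element of xs (1-based), by quickselect."""
--     while True:
--         pivot = xs[len(xs) // 2]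
--         highs = [x for x in xs if x > pivot]
--         if k <= len(highs):
--             xs = highs
--             continue
--         n_eq = xs.count(pivot)
--         if k <= len(highs) + n_eq:
--             return pivot
--         k -= len(highs) + n_eq
--         xs = [x for x in xs if x < pivot]
-- ===== Notes on version B (the rewrite author's own statement) =====
-- stated objective: alternative
-- what changed: B never sorts: it quickselects the N smallest values by three-way partitioning, then computes the sum of their largest half and the median by further selection (O(n) average), where A sorts the whole list and walks the top indices backwards; Pre_ excludes N outside [0, len(arr)], where A raises IndexError or returns accidents of negative indexing.
-- outside the precondition, e.g. on solve([1, 2], -1): A returns 2, B raises IndexError; on solve([1, 2], -2): A returns 0, B returns 0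
import Mathlib
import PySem

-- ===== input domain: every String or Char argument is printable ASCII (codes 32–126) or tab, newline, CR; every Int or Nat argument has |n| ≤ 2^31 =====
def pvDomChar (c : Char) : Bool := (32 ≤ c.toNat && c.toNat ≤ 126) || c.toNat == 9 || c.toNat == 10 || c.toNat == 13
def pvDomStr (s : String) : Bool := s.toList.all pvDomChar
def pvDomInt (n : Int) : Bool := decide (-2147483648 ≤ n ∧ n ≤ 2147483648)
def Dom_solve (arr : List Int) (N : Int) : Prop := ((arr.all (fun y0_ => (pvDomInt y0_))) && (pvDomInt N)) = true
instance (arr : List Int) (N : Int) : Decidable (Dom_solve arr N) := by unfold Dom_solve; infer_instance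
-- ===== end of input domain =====

-- B replaces A's full sort + backwards doubling loop by quickselect-style three-way
-- partitioning: it sums the N//2 largest elements and selects the median without sorting.
-- A sorts its list argument in place in Python; the equivalence proved here is about the
-- return value only.


-- ===== PORT A =====
def solve (arr : List Int) (N : Int) : Int :=
  let s := PySem.List.sorted arr (fun x => x) false
  let middle : Int :=
    if PySem.Int.mod N 2 == 0 then PySem.Int.floordiv N 2 - 1
    else PySem.Int.floordiv (N + 1) 2 - 1
  let sum0 := (PySem.List.pyRange (N - 1) middle (-1)).foldl
    (fun acc i => acc + PySem.List.pyGetD s i 0 * 2) 0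
  if PySem.Int.mod N 2 == 1 then sum0 + PySem.List.pyGetD s middle 0 else sum0

-- ===== PORT B =====
-- termination facts for the partition recursion (cited by the ports' decreasing_by)
theorem pv_filter_lt (xs : List Int) (x : Int) (hx : x ∈ xs) (p : Int → Bool)
    (hp : p x = false) : (xs.filter p).length < xs.length :=
  List.length_filter_lt_length_iff_exists.mpr ⟨x, hx, by simp [hp]⟩

theorem pv_mid_mem (xs : List Int) (hne : xs ≠ []) : xs.getD (xs.length / 2) 0 ∈ xs := by
  have hlt : xs.length / 2 < xs.length := Nat.div_lt_self (List.length_pos_iff.mpr hne) one_lt_two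
  rw [List.getD_eq_getElem xs 0 hlt]; exact List.getElem_mem hlt

-- sum of the k largest elements of xs, by three-way quickselect partitioning
-- (Source B's _sum_largest while-loop as tail recursion over the same state xs, k, acc)
def sumLargest (xs : List Int) (k : Int) (acc : Int) : Int :=
  if 0 < k then
    if _hne : xs = [] then acc  -- Python raises IndexError here (totality guard; unreachable under Pre_)
    else
      let pivot := xs.getD (xs.length / 2) 0   -- xs[len(xs)//2]; exact: the index is in range since xs ≠ []
      let highs := xs.filter (fun x => decide (pivot < x))
      if k ≤ (highs.length : Int) then sumLargest highs k acc
      else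
        let nEq : Int := (xs.count pivot : Int)
        if k ≤ (highs.length : Int) + nEq then acc + highs.sum + (k - (highs.length : Int)) * pivot
        else sumLargest (xs.filter (fun x => decide (x < pivot)))
          (k - (highs.length : Int) - nEq) (acc + highs.sum + nEq * pivot)
  else acc
termination_by xs.length
decreasing_by
  · rw [List.unattach_filter (g := fun x => decide (xs.getD (xs.length / 2) 0 < x))
        (hf := fun x h => rfl), List.unattach_attach]
    exact pv_filter_lt xs _ (pv_mid_mem xs _hne) _ (by simp)
  · rw [List.unattach_filter (g := fun x => decide (x < xs.getD (xs.length / 2) 0))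
        (hf := fun x h => rfl), List.unattach_attach]
    exact pv_filter_lt xs _ (pv_mid_mem xs _hne) _ (by simp)

-- the k-th largest element of xs (1-based), by quickselect (Source B's _kth_largest while-loop)
def kthLargest (xs : List Int) (k : Int) : Int :=
  if _hne : xs = [] then 0  -- Python raises IndexError here (totality guard; unreachable under Pre_)
  else
    let pivot := xs.getD (xs.length / 2) 0     -- xs[len(xs)//2]; exact: the index is in range since xs ≠ []
    let highs := xs.filter (fun x => decide (pivot < x))
    if k ≤ (highs.length : Int) then kthLargest highs k
    else
      let nEq : Int := (xs.count pivot : Int)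
      if k ≤ (highs.length : Int) + nEq then pivot
      else kthLargest (xs.filter (fun x => decide (x < pivot))) (k - (highs.length : Int) - nEq)
termination_by xs.length
decreasing_by
  · rw [List.unattach_filter (g := fun x => decide (xs.getD (xs.length / 2) 0 < x))
        (hf := fun x h => rfl), List.unattach_attach]
    exact pv_filter_lt xs _ (pv_mid_mem xs _hne) _ (by simp)
  · rw [List.unattach_filter (g := fun x => decide (x < xs.getD (xs.length / 2) 0))
        (hf := fun x h => rfl), List.unattach_attach]
    exact pv_filter_lt xs _ (pv_mid_mem xs _hne) _ (by simp)

-- the m smallest elements of xs (multiset, arbitrary order), by partitioning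
-- (Source B's _n_smallest while-loop as tail recursion over the same state xs, m, out)
def nSmallest (xs : List Int) (m : Int) (out : List Int) : List Int :=
  if 0 < m then
    if _hne : xs = [] then out  -- Python raises IndexError here (totality guard; unreachable under Pre_)
    else
      let pivot := xs.getD (xs.length / 2) 0   -- xs[len(xs)//2]; exact: the index is in range since xs ≠ []
      let lows := xs.filter (fun x => decide (x < pivot))
      if m ≤ (lows.length : Int) then nSmallest lows m out
      else
        let nEq : Int := (xs.count pivot : Int)
        if m ≤ (lows.length : Int) + nEq then
          out ++ lows ++ List.replicate (m - (lows.length : Int)).toNat pivot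
        else nSmallest (xs.filter (fun x => decide (pivot < x))) (m - (lows.length : Int) - nEq)
          (out ++ lows ++ List.replicate nEq.toNat pivot)
  else out
termination_by xs.length
decreasing_by
  · rw [List.unattach_filter (g := fun x => decide (x < xs.getD (xs.length / 2) 0))
        (hf := fun x h => rfl), List.unattach_attach]
    exact pv_filter_lt xs _ (pv_mid_mem xs _hne) _ (by simp)
  · rw [List.unattach_filter (g := fun x => decide (xs.getD (xs.length / 2) 0 < x))
        (hf := fun x h => rfl), List.unattach_attach]
    exact pv_filter_lt xs _ (pv_mid_mem xs _hne) _ (by simp)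

def solve_alt (arr : List Int) (N : Int) : Int :=
  let vals := nSmallest arr N []
  let k := PySem.Int.floordiv N 2
  let total := 2 * sumLargest vals k 0
  if PySem.Int.mod N 2 == 1 then total + kthLargest vals (k + 1) else total

-- ===== PRECONDITION & SPEC =====
-- Pre_ excludes N outside [0, len(arr)]: A raises IndexError for N > len(arr), and for
-- negative N its value (0 from an empty range, or a negative-index wraparound pick such as
-- arr[-1]) is an accident of Python indexing; B raises IndexError on odd negative N.
def Pre_solve (arr : List Int) (N : Int) : Prop := 0 ≤ N ∧ N ≤ (arr.length : Int)
instance (arr : List Int) (N : Int) : Decidable (Pre_solve arr N) := by unfold Pre_solve; infer_instance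
def pvWitness_solve : List Int × Int := ([3, 1, 2, 5, 4], 5)
def Spec_solve (arr : List Int) (N : Int) (out : Int) : Prop := out = solve_alt arr N
instance (arr : List Int) (N : Int) (out : Int) : Decidable (Spec_solve arr N out) := by unfold Spec_solve; infer_instance

-- ===== CLAIM (what is proved, stated in full; the proofs are below) =====
def Claim_equal_solve : Prop := ∀ (arr : List Int) (N : Int), Dom_solve arr N → Pre_solve arr N → Spec_solve arr N (solve arr N)

-- ===== LEMMAS AND PROOFS =====

-- sorted(xs, reverse=True) on Ints is the reverse of sorted(xs): a ≥-ordered permutation is unique.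
theorem sortedRev_eq_rev (xs : List Int) :
    PySem.List.sorted xs (fun x => x) true = (PySem.List.sorted xs (fun x => x) false).reverse := by
  have h1 : (PySem.List.sorted xs (fun x => x) true).Perm xs := PySem.List.sorted_perm ..
  have h2 : (PySem.List.sorted xs (fun x => x) false).Perm xs := PySem.List.sorted_perm ..
  have p1 : (PySem.List.sorted xs (fun x => x) true).Pairwise (fun a b => b ≤ a) := by
    simpa using PySem.List.sorted_pairwise_rev xs (fun x => x)
  have p2 : (PySem.List.sorted xs (fun x => x) false).Pairwise (fun a b => a ≤ b) := by
    simpa using PySem.List.sorted_pairwise xs (fun x => x)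
  have p2' : ((PySem.List.sorted xs (fun x => x) false).reverse).Pairwise (fun a b => b ≤ a) := by
    rw [List.pairwise_reverse]; exact p2
  exact List.Perm.eq_of_pairwise (fun a b _ _ h h' => le_antisymm h' h) p1 p2'
    (h1.trans (h2.symm.trans (List.reverse_perm _).symm))

theorem count_filter_eq (l : List Int) (p : Int → Bool) (a : Int) :
    (l.filter p).count a = if p a then l.count a else 0 := by
  by_cases h : p a
  · rw [if_pos h, List.count_filter h]
  · rw [if_neg h, List.count_eq_zero]
    intro hmem
    exact h ((List.mem_filter.mp hmem).2)

-- Three-way partition of a descending sort around any pivot: the elements above the pivot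
-- (descending), then the pivot's copies, then the elements below it (descending).
theorem desc_partition (xs : List Int) (pivot : Int) :
    PySem.List.sorted xs (fun x => x) true =
      PySem.List.sorted (xs.filter (fun x => decide (pivot < x))) (fun x => x) true
        ++ List.replicate (xs.count pivot) pivot
        ++ PySem.List.sorted (xs.filter (fun x => decide (x < pivot))) (fun x => x) true := by
  set A := PySem.List.sorted (xs.filter (fun x => decide (pivot < x))) (fun x => x) true with hA
  set L := PySem.List.sorted (xs.filter (fun x => decide (x < pivot))) (fun x => x) true with hL
  set R := List.replicate (xs.count pivot) pivot with hR
  have memA : ∀ a ∈ A, pivot < a := by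
    intro a ha
    have := (PySem.List.mem_sorted _ _ _ _).mp ha
    simpa using (List.mem_filter.mp this).2
  have memL : ∀ a ∈ L, a < pivot := by
    intro a ha
    have := (PySem.List.mem_sorted _ _ _ _).mp ha
    simpa using (List.mem_filter.mp this).2
  have memR : ∀ a ∈ R, a = pivot := fun a ha => List.eq_of_mem_replicate ha
  have hperm : (A ++ R ++ L).Perm xs := by
    rw [List.perm_iff_count]
    intro a
    have hcA : A.count a = (xs.filter (fun x => decide (pivot < x))).count a :=
      (PySem.List.sorted_perm ..).count_eq a
    have hcL : L.count a = (xs.filter (fun x => decide (x < pivot))).count a :=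
      (PySem.List.sorted_perm ..).count_eq a
    rw [List.count_append, List.count_append, hcA, hcL, hR, List.count_replicate,
        count_filter_eq, count_filter_eq]
    rcases lt_trichotomy a pivot with h | h | h
    · simp [h, h.ne', not_lt_of_gt h]
    · subst h; simp
    · simp [h, lt_asymm h, h.ne]
  have pwA : A.Pairwise (fun a b => b ≤ a) := by
    simpa using PySem.List.sorted_pairwise_rev (xs.filter (fun x => decide (pivot < x))) (fun x => x)
  have pwL : L.Pairwise (fun a b => b ≤ a) := by
    simpa using PySem.List.sorted_pairwise_rev (xs.filter (fun x => decide (x < pivot))) (fun x => x)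
  have pwR : R.Pairwise (fun a b => b ≤ a) :=
    List.pairwise_replicate.mpr (Or.inr le_rfl)
  have pwRHS : (A ++ R ++ L).Pairwise (fun a b => b ≤ a) := by
    rw [List.append_assoc, List.pairwise_append]
    refine ⟨pwA, List.pairwise_append.mpr ⟨pwR, pwL, ?_⟩, ?_⟩
    · intro a ha b hb
      rw [memR a ha]
      exact le_of_lt (memL b hb)
    · intro a ha b hb
      rcases List.mem_append.mp hb with hb | hb
      · rw [memR b hb]; exact le_of_lt (memA a ha)
      · exact le_of_lt ((memL b hb).trans (memA a ha))
  have pwLHS : (PySem.List.sorted xs (fun x => x) true).Pairwise (fun a b => b ≤ a) := by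
    simpa using PySem.List.sorted_pairwise_rev xs (fun x => x)
  exact List.Perm.eq_of_pairwise (fun a b _ _ h h' => le_antisymm h' h) pwLHS pwRHS
    ((PySem.List.sorted_perm ..).trans hperm.symm)

-- length bookkeeping of the three-way partition
theorem partition_length (xs : List Int) (pivot : Int) :
    (xs.filter (fun x => decide (pivot < x))).length + xs.count pivot
      + (xs.filter (fun x => decide (x < pivot))).length = xs.length := by
  have h := congrArg List.length (desc_partition xs pivot)
  simp only [PySem.List.length_sorted, List.length_append, List.length_replicate] at h
  omega

-- take/sum and index facts for a three-block concatenation A ++ pivot-copies ++ L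
theorem take3_sum_left (A L : List Int) (c : Nat) (pivot : Int) (k : Nat) (hk : k ≤ A.length) :
    (A ++ List.replicate c pivot ++ L).take k = A.take k := by
  rw [List.append_assoc, List.take_append_of_le_length hk]

theorem take3_sum_mid (A L : List Int) (c : Nat) (pivot : Int) (k : Nat)
    (hA : A.length ≤ k) (hk : k ≤ A.length + c) :
    ((A ++ List.replicate c pivot ++ L).take k).sum = A.sum + ((k - A.length : Nat) : Int) * pivot := by
  rw [List.append_assoc, List.take_append, List.take_of_length_le hA,
      List.take_append_of_le_length (by simp [List.length_replicate]; omega),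
      List.take_replicate, List.sum_append, List.sum_replicate_int]
  rw [min_eq_left (by omega)]

theorem take3_sum_right (A L : List Int) (c : Nat) (pivot : Int) (k : Nat)
    (hk : A.length + c ≤ k) :
    ((A ++ List.replicate c pivot ++ L).take k).sum
      = A.sum + (c : Int) * pivot + (L.take (k - A.length - c)).sum := by
  rw [List.append_assoc, List.take_append, List.take_of_length_le (by omega),
      List.take_append, List.take_of_length_le (by simp [List.length_replicate]; omega),
      List.sum_append, List.sum_append, List.sum_replicate_int, List.length_replicate]
  ring

theorem get3_left (A L : List Int) (c : Nat) (pivot : Int) (k : Nat) (hk : k < A.length) :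
    (A ++ List.replicate c pivot ++ L).getD k 0 = A.getD k 0 := by
  rw [List.getD_eq_getElem?_getD, List.getD_eq_getElem?_getD, List.append_assoc,
      List.getElem?_append_left hk]

theorem get3_mid (A L : List Int) (c : Nat) (pivot : Int) (k : Nat)
    (h1 : A.length ≤ k) (h2 : k < A.length + c) :
    (A ++ List.replicate c pivot ++ L).getD k 0 = pivot := by
  rw [List.getD_eq_getElem?_getD, List.append_assoc, List.getElem?_append_right h1,
      List.getElem?_append_left (by simp [List.length_replicate]; omega),
      List.getElem?_replicate, if_pos (by omega)]
  rfl

theorem get3_right (A L : List Int) (c : Nat) (pivot : Int) (k : Nat)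
    (h : A.length + c ≤ k) :
    (A ++ List.replicate c pivot ++ L).getD k 0 = L.getD (k - A.length - c) 0 := by
  rw [List.getD_eq_getElem?_getD, List.getD_eq_getElem?_getD, List.append_assoc,
      List.getElem?_append_right (by omega), List.getElem?_append_right
        (by simp [List.length_replicate]; omega), List.length_replicate]

-- Invariant of Source B's _sum_largest loop: it adds the sum of the k largest elements to acc.
theorem sumLargest_eq (n : Nat) : ∀ (xs : List Int), xs.length ≤ n → ∀ (k : Nat), k ≤ xs.length →
    ∀ (acc : Int), sumLargest xs (k : Int) acc
      = acc + (((PySem.List.sorted xs (fun x => x) true).take k).sum) := by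
  induction n with
  | zero =>
    intro xs hlen k hk acc
    have hxs : xs = [] := List.length_eq_zero_iff.mp (by omega)
    have hk0 : k = 0 := by omega
    subst hxs; subst hk0
    rw [sumLargest]
    simp
  | succ n ih =>
    intro xs hlen k hk acc
    rw [sumLargest]
    by_cases hk0 : k = 0
    · subst hk0; simp
    · have hkpos : (0 : Int) < (k : Int) := by exact_mod_cast Nat.pos_of_ne_zero hk0
      rw [if_pos hkpos]
      have hne : xs ≠ [] := by
        intro h; subst h; simp at hk; omega
      rw [dif_neg hne]
      set pivot := xs.getD (xs.length / 2) 0 with hpiv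
      have hpart := desc_partition xs pivot
      have hlens := partition_length xs pivot
      have hhlt : (xs.filter (fun x => decide (pivot < x))).length < xs.length :=
        pv_filter_lt xs pivot (pv_mid_mem xs hne) _ (by simp)
      have hllt : (xs.filter (fun x => decide (x < pivot))).length < xs.length :=
        pv_filter_lt xs pivot (pv_mid_mem xs hne) _ (by simp)
      have hlenA : (PySem.List.sorted (xs.filter (fun x => decide (pivot < x))) (fun x => x) true).length
          = (xs.filter (fun x => decide (pivot < x))).length := PySem.List.length_sorted ..
      have hsumA : (PySem.List.sorted (xs.filter (fun x => decide (pivot < x))) (fun x => x) true).sum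
          = (xs.filter (fun x => decide (pivot < x))).sum := (PySem.List.sorted_perm ..).sum_eq
      by_cases hb1 : (k : Int) ≤ ((xs.filter (fun x => decide (pivot < x))).length : Int)
      · rw [if_pos hb1]
        have hkH : k ≤ (xs.filter (fun x => decide (pivot < x))).length := by exact_mod_cast hb1
        rw [ih _ (by omega) k hkH acc, hpart, take3_sum_left _ _ _ _ _ (by omega)]
      · rw [if_neg hb1]
        have hkH : (xs.filter (fun x => decide (pivot < x))).length < k := by
          by_contra h
          exact hb1 (by exact_mod_cast Nat.le_of_not_lt h)
        by_cases hb2 : (k : Int) ≤ ((xs.filter (fun x => decide (pivot < x))).length : Int)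
            + ((xs.count pivot : Nat) : Int)
        · rw [if_pos hb2]
          have hkHC : k ≤ (xs.filter (fun x => decide (pivot < x))).length + xs.count pivot := by
            exact_mod_cast hb2
          rw [hpart, take3_sum_mid _ _ _ _ _ (by omega) (by omega), hsumA, hlenA]
          have hc : ((k - (xs.filter (fun x => decide (pivot < x))).length : Nat) : Int)
              = (k : Int) - ((xs.filter (fun x => decide (pivot < x))).length : Int) := by omega
          rw [hc]
          ring
        · rw [if_neg hb2]
          have hkHC : (xs.filter (fun x => decide (pivot < x))).length + xs.count pivot < k := by
            by_contra h
            exact hb2 (by exact_mod_cast Nat.le_of_not_lt h)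
          have hcast : (k : Int) - ((xs.filter (fun x => decide (pivot < x))).length : Int)
              - ((xs.count pivot : Nat) : Int)
              = ((k - (xs.filter (fun x => decide (pivot < x))).length - xs.count pivot : Nat) : Int) := by
            omega
          rw [hcast, ih _ (by omega) _ (by omega) _, hpart,
              take3_sum_right _ _ _ _ _ (by omega), hsumA, hlenA]
          ring

-- Invariant of Source B's _kth_largest loop: it returns position k-1 of the descending sort.
theorem kthLargest_eq (n : Nat) : ∀ (xs : List Int), xs.length ≤ n → ∀ (k : Nat), 1 ≤ k → k ≤ xs.length →
    kthLargest xs (k : Int) = (PySem.List.sorted xs (fun x => x) true).getD (k - 1) 0 := by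
  induction n with
  | zero =>
    intro xs hlen k hk1 hk
    omega
  | succ n ih =>
    intro xs hlen k hk1 hk
    have hne : xs ≠ [] := by
      intro h; subst h; simp at hk; omega
    rw [kthLargest, dif_neg hne]
    set pivot := xs.getD (xs.length / 2) 0 with hpiv
    have hpart := desc_partition xs pivot
    have hlens := partition_length xs pivot
    have hhlt : (xs.filter (fun x => decide (pivot < x))).length < xs.length :=
      pv_filter_lt xs pivot (pv_mid_mem xs hne) _ (by simp)
    have hllt : (xs.filter (fun x => decide (x < pivot))).length < xs.length :=
      pv_filter_lt xs pivot (pv_mid_mem xs hne) _ (by simp)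
    have hlenA : (PySem.List.sorted (xs.filter (fun x => decide (pivot < x))) (fun x => x) true).length
        = (xs.filter (fun x => decide (pivot < x))).length := PySem.List.length_sorted ..
    by_cases hb1 : (k : Int) ≤ ((xs.filter (fun x => decide (pivot < x))).length : Int)
    · rw [if_pos hb1]
      have hkH : k ≤ (xs.filter (fun x => decide (pivot < x))).length := by exact_mod_cast hb1
      rw [ih _ (by omega) k hk1 hkH, hpart, get3_left _ _ _ _ _ (by omega)]
    · rw [if_neg hb1]
      have hkH : (xs.filter (fun x => decide (pivot < x))).length < k := by
        by_contra h
        exact hb1 (by exact_mod_cast Nat.le_of_not_lt h)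
      by_cases hb2 : (k : Int) ≤ ((xs.filter (fun x => decide (pivot < x))).length : Int)
          + ((xs.count pivot : Nat) : Int)
      · rw [if_pos hb2]
        have hkHC : k ≤ (xs.filter (fun x => decide (pivot < x))).length + xs.count pivot := by
          exact_mod_cast hb2
        rw [hpart, get3_mid _ _ _ _ _ (by omega) (by omega)]
      · rw [if_neg hb2]
        have hkHC : (xs.filter (fun x => decide (pivot < x))).length + xs.count pivot < k := by
          by_contra h
          exact hb2 (by exact_mod_cast Nat.le_of_not_lt h)
        have hcast : (k : Int) - ((xs.filter (fun x => decide (pivot < x))).length : Int)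
            - ((xs.count pivot : Nat) : Int)
            = ((k - (xs.filter (fun x => decide (pivot < x))).length - xs.count pivot : Nat) : Int) := by
          omega
        rw [hcast, ih _ (by omega) _ (by omega) (by omega), hpart,
            get3_right _ _ _ _ _ (by omega), hlenA]
        congr 1
        omega

-- Ascending counterpart of desc_partition (obtained by reversing).
theorem asc_partition (xs : List Int) (pivot : Int) :
    PySem.List.sorted xs (fun x => x) false =
      PySem.List.sorted (xs.filter (fun x => decide (x < pivot))) (fun x => x) false
        ++ List.replicate (xs.count pivot) pivot
        ++ PySem.List.sorted (xs.filter (fun x => decide (pivot < x))) (fun x => x) false := by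
  have e1 : ∀ l : List Int,
      (PySem.List.sorted l (fun x => x) true).reverse = PySem.List.sorted l (fun x => x) false := by
    intro l
    rw [sortedRev_eq_rev, List.reverse_reverse]
  have h := congrArg List.reverse (desc_partition xs pivot)
  rw [e1, List.reverse_append, List.reverse_append, e1, e1, List.reverse_replicate] at h
  rw [h, List.append_assoc]

theorem take3_mid_list (A L : List Int) (c : Nat) (pivot : Int) (k : Nat)
    (hA : A.length ≤ k) (hk : k ≤ A.length + c) :
    (A ++ List.replicate c pivot ++ L).take k = A ++ List.replicate (k - A.length) pivot := by
  rw [List.append_assoc, List.take_append, List.take_of_length_le hA,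
      List.take_append_of_le_length (by simp [List.length_replicate]; omega),
      List.take_replicate, min_eq_left (by omega)]

theorem take3_right_list (A L : List Int) (c : Nat) (pivot : Int) (k : Nat)
    (h : A.length + c ≤ k) :
    (A ++ List.replicate c pivot ++ L).take k
      = A ++ List.replicate c pivot ++ L.take (k - A.length - c) := by
  rw [List.append_assoc, List.take_append, List.take_of_length_le (by omega),
      List.take_append, List.take_of_length_le (by simp [List.length_replicate]; omega),
      List.length_replicate, List.append_assoc]

-- Invariant of Source B's _n_smallest loop: it returns out plus the m smallest elements of xs.
theorem nSmallest_perm (n : Nat) : ∀ (xs : List Int), xs.length ≤ n → ∀ (m : Nat), m ≤ xs.length →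
    ∀ (out : List Int), (nSmallest xs (m : Int) out).Perm
      (out ++ (PySem.List.sorted xs (fun x => x) false).take m) := by
  induction n with
  | zero =>
    intro xs hlen m hm out
    have hm0 : m = 0 := by omega
    subst hm0
    rw [nSmallest]
    simp
  | succ n ih =>
    intro xs hlen m hm out
    rw [nSmallest]
    by_cases hm0 : m = 0
    · subst hm0; simp
    · have hmpos : (0 : Int) < (m : Int) := by exact_mod_cast Nat.pos_of_ne_zero hm0
      rw [if_pos hmpos]
      have hne : xs ≠ [] := by
        intro h; subst h; simp at hm; omega
      rw [dif_neg hne]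
      set pivot := xs.getD (xs.length / 2) 0 with hpiv
      have hpart := asc_partition xs pivot
      have hlens := partition_length xs pivot
      have hhlt : (xs.filter (fun x => decide (pivot < x))).length < xs.length :=
        pv_filter_lt xs pivot (pv_mid_mem xs hne) _ (by simp)
      have hllt : (xs.filter (fun x => decide (x < pivot))).length < xs.length :=
        pv_filter_lt xs pivot (pv_mid_mem xs hne) _ (by simp)
      have hlenL : (PySem.List.sorted (xs.filter (fun x => decide (x < pivot))) (fun x => x) false).length
          = (xs.filter (fun x => decide (x < pivot))).length := PySem.List.length_sorted ..
      have hcntL : ∀ a : Int,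
          (PySem.List.sorted (xs.filter (fun x => decide (x < pivot))) (fun x => x) false).count a
            = (xs.filter (fun x => decide (x < pivot))).count a :=
        fun a => (PySem.List.sorted_perm ..).count_eq a
      by_cases hb1 : (m : Int) ≤ ((xs.filter (fun x => decide (x < pivot))).length : Int)
      · rw [if_pos hb1]
        have hmL : m ≤ (xs.filter (fun x => decide (x < pivot))).length := by exact_mod_cast hb1
        rw [hpart, take3_sum_left _ _ _ _ _ (by omega)]
        exact ih _ (by omega) m hmL out
      · rw [if_neg hb1]
        have hmL : (xs.filter (fun x => decide (x < pivot))).length < m := by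
          by_contra h
          exact hb1 (by exact_mod_cast Nat.le_of_not_lt h)
        by_cases hb2 : (m : Int) ≤ ((xs.filter (fun x => decide (x < pivot))).length : Int)
            + ((xs.count pivot : Nat) : Int)
        · rw [if_pos hb2]
          have hmLC : m ≤ (xs.filter (fun x => decide (x < pivot))).length + xs.count pivot := by
            exact_mod_cast hb2
          have hrep : ((m : Int) - ((xs.filter (fun x => decide (x < pivot))).length : Int)).toNat
              = m - (xs.filter (fun x => decide (x < pivot))).length := by omega
          rw [hrep, hpart, take3_mid_list _ _ _ _ _ (by omega) (by omega), hlenL]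
          rw [List.perm_iff_count]
          intro a
          simp only [List.count_append]
          rw [hcntL a]
          omega
        · rw [if_neg hb2]
          have hmLC : (xs.filter (fun x => decide (x < pivot))).length + xs.count pivot < m := by
            by_contra h
            exact hb2 (by exact_mod_cast Nat.le_of_not_lt h)
          have hcast : (m : Int) - ((xs.filter (fun x => decide (x < pivot))).length : Int)
              - ((xs.count pivot : Nat) : Int)
              = ((m - (xs.filter (fun x => decide (x < pivot))).length - xs.count pivot : Nat) : Int) := by
            omega
          have hrep : ((xs.count pivot : Nat) : Int).toNat = xs.count pivot := by omega
          rw [hcast, hrep]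
          refine (ih _ (by omega) _ (by omega) _).trans ?_
          rw [hpart, take3_right_list _ _ _ _ _ (by omega), hlenL]
          rw [List.perm_iff_count]
          intro a
          simp only [List.count_append]
          rw [hcntL a]
          omega

-- The descending order of the selected m smallest values is the reversed ascending prefix.
theorem desc_nSmallest (arr : List Int) (m : Nat) (hm : m ≤ arr.length) :
    PySem.List.sorted (nSmallest arr (m : Int) []) (fun x => x) true
      = ((PySem.List.sorted arr (fun x => x) false).take m).reverse := by
  have hperm : (nSmallest arr (m : Int) []).Perm
      ((PySem.List.sorted arr (fun x => x) false).take m) := by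
    simpa using nSmallest_perm arr.length arr le_rfl m hm []
  have h1 : PySem.List.sorted (nSmallest arr (m : Int) []) (fun x => x) false
      = PySem.List.sorted ((PySem.List.sorted arr (fun x => x) false).take m) (fun x => x) false :=
    PySem.List.sorted_eq_sorted_of_perm _ _ _ (fun a b h => h) hperm
  have hpw : ((PySem.List.sorted arr (fun x => x) false).take m).Pairwise (fun a b => a ≤ b) := by
    exact List.Pairwise.sublist (List.take_sublist ..) (by simpa using PySem.List.sorted_pairwise arr (fun x => x))
  have h2 : PySem.List.sorted ((PySem.List.sorted arr (fun x => x) false).take m) (fun x => x) false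
      = (PySem.List.sorted arr (fun x => x) false).take m :=
    PySem.List.sorted_eq_self_of_pairwise _ _ hpw
  rw [sortedRev_eq_rev, h1, h2]

theorem nSmallest_length (arr : List Int) (m : Nat) (hm : m ≤ arr.length) :
    (nSmallest arr (m : Int) []).length = m := by
  have hperm : (nSmallest arr (m : Int) []).Perm
      ((PySem.List.sorted arr (fun x => x) false).take m) := by
    simpa using nSmallest_perm arr.length arr le_rfl m hm []
  rw [hperm.length_eq, List.length_take, PySem.List.length_sorted]
  omega

-- A's backwards doubled sum over indices n-1, n-2, … equals twice the sum of a front slice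
-- of the reversed list.
theorem sum_top (s : List Int) (n c : Nat) (hc : c ≤ n) (hn : n ≤ s.length) :
    ((List.range c).map (fun j => s.getD (n - 1 - j) 0 * 2)).sum
      = 2 * ((s.reverse.drop (s.length - n)).take c).sum := by
  induction c with
  | zero => simp
  | succ c ih =>
    have hc' : c ≤ n := by omega
    rw [List.range_succ, List.map_append, List.sum_append, List.take_add_one, List.sum_append,
        ih hc', Int.mul_add]
    congr 1
    have h1 : (s.reverse.drop (s.length - n))[c]? = s[n - 1 - c]? := by
      rw [List.getElem?_drop, List.getElem?_reverse (by omega)]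
      congr 1
      omega
    have h2 : n - 1 - c < s.length := by omega
    rw [h1, List.getElem?_eq_getElem h2]
    simp [List.getD_eq_getElem?_getD, List.getElem?_eq_getElem h2]
    ring

-- A's value on 0 ≤ N ≤ len(arr), in closed form over the reversed ascending prefix of length N.
theorem solve_closed (arr : List Int) (n : Nat) (hn : n ≤ arr.length) :
    solve arr (n : Int)
      = 2 * (((((PySem.List.sorted arr (fun x => x) false).take n).reverse).take (n / 2)).sum)
        + (if n % 2 = 1
           then (((PySem.List.sorted arr (fun x => x) false).take n).reverse).getD (n / 2) 0 else 0) := by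
  simp only [solve]
  set s := PySem.List.sorted arr (fun x => x) false with hs
  have hslen : s.length = arr.length := PySem.List.length_sorted ..
  have hrev : (s.take n).reverse = s.reverse.drop (s.length - n) := List.reverse_take
  rw [hrev]
  have hmod : PySem.Int.mod (↑n) 2 = ((n % 2 : Nat) : Int) := by
    exact_mod_cast PySem.Int.mod_natCast n 2
  have hdiv : PySem.Int.floordiv (↑n) 2 = ((n / 2 : Nat) : Int) := by
    exact_mod_cast PySem.Int.floordiv_natCast n 2
  have hdiv1 : PySem.Int.floordiv (↑n + 1) 2 = (((n + 1) / 2 : Nat) : Int) := by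
    have : ((n : Int) + 1) = ((n + 1 : Nat) : Int) := by push_cast; ring
    rw [this]
    exact_mod_cast PySem.Int.floordiv_natCast (n + 1) 2
  have hsum : (PySem.List.pyRange ((n : Int) - 1) ((n : Int) - 1 - ((n / 2 : Nat) : Int)) (-1)).foldl
      (fun acc i => acc + PySem.List.pyGetD s i 0 * 2) 0
      = 2 * (((s.reverse.drop (s.length - n)).take (n / 2)).sum) := by
    rw [PySem.List.pyRange_neg_one, PySem.List.foldl_add, List.map_map]
    have hct : ((n : Int) - 1 - ((n : Int) - 1 - ((n / 2 : Nat) : Int))).toNat = n / 2 := by omega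
    rw [hct]
    have hmapeq : (List.range (n / 2)).map
          ((fun i => PySem.List.pyGetD s i 0 * 2) ∘ fun k => (n : Int) - 1 - ↑k)
        = (List.range (n / 2)).map (fun j => s.getD (n - 1 - j) 0 * 2) := by
      apply List.map_congr_left
      intro k hk
      have hk' : k < n / 2 := List.mem_range.mp hk
      have hcast : ((n : Int) - 1 - (k : Int)) = ((n - 1 - k : Nat) : Int) := by omega
      simp only [Function.comp, hcast, PySem.List.pyGetD_natCast]
    rw [hmapeq, sum_top s n (n / 2) (by omega) (by omega)]
    ring
  rcases Nat.even_or_odd n with he | ho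
  · have hp : n % 2 = 0 := Nat.even_iff.mp he
    have c0 : (PySem.Int.mod (↑n) 2 == 0) = true := by rw [hmod, hp]; decide
    have c1 : (PySem.Int.mod (↑n) 2 == 1) = false := by rw [hmod, hp]; decide
    rw [c0, c1]
    simp only [if_true, if_false, Bool.false_eq_true]
    have hmid : PySem.Int.floordiv (↑n) 2 - 1 = (n : Int) - 1 - ((n / 2 : Nat) : Int) := by
      rw [hdiv]; omega
    rw [hmid, hsum, if_neg (by omega : ¬ n % 2 = 1)]
    ring
  · have hp : n % 2 = 1 := Nat.odd_iff.mp ho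
    have c0 : (PySem.Int.mod (↑n) 2 == 0) = false := by rw [hmod, hp]; decide
    have c1 : (PySem.Int.mod (↑n) 2 == 1) = true := by rw [hmod, hp]; decide
    rw [c0, c1]
    simp only [if_true, if_false, Bool.false_eq_true]
    have hq : (n + 1) / 2 = n / 2 + 1 := by omega
    have hmid : PySem.Int.floordiv (↑n + 1) 2 - 1 = (n : Int) - 1 - ((n / 2 : Nat) : Int) := by
      rw [hdiv1, hq]; omega
    rw [hmid, hsum, if_pos hp]
    have hmidA : (n : Int) - 1 - ((n / 2 : Nat) : Int) = ((n - 1 - n / 2 : Nat) : Int) := by omega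
    rw [hmidA, PySem.List.pyGetD_natCast]
    have hA : s.getD (n - 1 - n / 2) 0 = s[n - 1 - n / 2]'(by omega) :=
      List.getD_eq_getElem s 0 (by omega)
    have hBlen : n / 2 < (s.reverse.drop (s.length - n)).length := by
      rw [List.length_drop, List.length_reverse]; omega
    have hB : (s.reverse.drop (s.length - n)).getD (n / 2) 0
        = (s.reverse.drop (s.length - n))[n / 2]'hBlen :=
      List.getD_eq_getElem _ 0 hBlen
    rw [hA, hB, List.getElem_drop, List.getElem_reverse]
    have hix : s.length - 1 - (s.length - n + n / 2) = n - 1 - n / 2 := by omega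
    simp only [hix]

theorem solve_eq_solve_alt (arr : List Int) (N : Int) (h0 : 0 ≤ N)
    (hle : N ≤ (arr.length : Int)) : solve arr N = solve_alt arr N := by
  obtain ⟨n, rfl⟩ : ∃ n : Nat, N = (n : Int) := ⟨N.toNat, (Int.toNat_of_nonneg h0).symm⟩
  have hn : n ≤ arr.length := by exact_mod_cast hle
  rw [solve_closed arr n hn]
  simp only [solve_alt]
  have hdesc := desc_nSmallest arr n hn
  have hvlen := nSmallest_length arr n hn
  have hdiv : PySem.Int.floordiv (↑n) 2 = ((n / 2 : Nat) : Int) := by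
    exact_mod_cast PySem.Int.floordiv_natCast n 2
  have hmod : PySem.Int.mod (↑n) 2 = ((n % 2 : Nat) : Int) := by
    exact_mod_cast PySem.Int.mod_natCast n 2
  have hsl : sumLargest (nSmallest arr (n : Int) []) ((n / 2 : Nat) : Int) 0
      = 0 + ((((PySem.List.sorted arr (fun x => x) false).take n).reverse).take (n / 2)).sum := by
    rw [sumLargest_eq (nSmallest arr (n : Int) []).length _ le_rfl (n / 2) (by omega) 0, hdesc]
  rcases Nat.even_or_odd n with he | ho
  · have hp : n % 2 = 0 := Nat.even_iff.mp he
    have c1 : (PySem.Int.mod (↑n) 2 == 1) = false := by rw [hmod, hp]; decide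
    rw [c1, hdiv, hsl, if_neg (by omega : ¬ n % 2 = 1)]
    simp only [Bool.false_eq_true, if_false]
    ring
  · have hp : n % 2 = 1 := Nat.odd_iff.mp ho
    have c1 : (PySem.Int.mod (↑n) 2 == 1) = true := by rw [hmod, hp]; decide
    rw [c1, hdiv, hsl, if_pos hp]
    simp only [if_true]
    have hcast : ((n / 2 : Nat) : Int) + 1 = ((n / 2 + 1 : Nat) : Int) := by push_cast; ring
    rw [hcast, kthLargest_eq (nSmallest arr (n : Int) []).length _ le_rfl (n / 2 + 1)
        (by omega) (by omega), hdesc]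
    have h2 : n / 2 + 1 - 1 = n / 2 := by omega
    rw [h2]
    ring

-- ===== VERDICT (by name: the statement is the Claim_ definition above) =====
theorem solve_spec : Claim_equal_solve := by
  intro arr N _ hpre
  exact solve_eq_solve_alt arr N hpre.1 hpre.2
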